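-- pv_equiv track=rewrite | github.com/rakshil17/FlamingoBeaversBackend | server/planning_service.py | _build_term_sequence
-- ===== SOURCE A (Python) =====
-- TERM_ORDER = ["term 1", "term 2", "term 3"]
--
-- TERM_RANK = {label: idx for idx, label in enumerate(TERM_ORDER)}
--
-- DEFAULT_START_TERM = "term 1"
--
-- def _build_term_sequence(enrollment_year: int, max_terms: int) -> list[tuple[int, str]]:
--     start_year = enrollment_year
--     start_rank = TERM_RANK[DEFAULT_START_TERM]
--
--     terms: list[tuple[int, str]] = []
--     year = start_year
--     rank = start_rank
--     for _ in range(max_terms):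
--         terms.append((year, TERM_ORDER[rank]))
--         rank += 1
--         if rank >= len(TERM_ORDER):
--             rank = 0
--             year += 1
--     return terms
-- ===== SOURCE B (Python) =====
-- TERM_ORDER = ["term 1", "term 2", "term 3"]
--
-- def _build_term_sequence(enrollment_year: int, max_terms: int) -> list[tuple[int, str]]:
--     # Closed form: element i is derived directly from its index, no carried state.
--     result: list[tuple[int, str]] = []
--     for i in range(max_terms):
--         q, r = divmod(i, len(TERM_ORDER))
--         result.append((enrollment_year + q, TERM_ORDER[r]))
--     return result
-- ===== Notes on version B (the rewrite author's own statement) =====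
-- stated objective: simpler
-- what changed: Replaced the stateful loop carrying a running (year, rank) pair with a manual carry by closed-form index arithmetic: element i is computed directly as (enrollment_year + i // 3, TERM_ORDER[i % 3]) via divmod.
import Mathlib
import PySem

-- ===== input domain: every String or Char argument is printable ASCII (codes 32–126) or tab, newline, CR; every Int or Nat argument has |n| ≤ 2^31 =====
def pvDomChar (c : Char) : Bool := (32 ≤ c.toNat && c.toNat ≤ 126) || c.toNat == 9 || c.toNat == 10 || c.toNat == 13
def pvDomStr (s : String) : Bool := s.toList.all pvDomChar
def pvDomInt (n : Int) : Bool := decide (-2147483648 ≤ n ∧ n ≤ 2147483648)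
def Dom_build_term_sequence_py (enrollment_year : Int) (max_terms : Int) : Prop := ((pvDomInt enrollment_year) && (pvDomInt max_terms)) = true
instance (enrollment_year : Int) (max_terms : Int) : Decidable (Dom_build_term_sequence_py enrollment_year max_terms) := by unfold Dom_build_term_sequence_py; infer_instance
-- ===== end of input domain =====

-- B replaces A's carried (year, rank) state by closed-form divmod index arithmetic (objective: simpler).

-- ===== PORT A =====
def pvTermOrder : List String := ["term 1", "term 2", "term 3"]

-- TERM_RANK[DEFAULT_START_TERM] = 0
def pvStartRank : Int := 0

-- A's loop: for _ in range(max_terms), appending (year, TERM_ORDER[rank]) and carrying (year, rank)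
def pvLoopA : Nat → Int → Int → List (Int × String)
  | 0, _, _ => []
  | n + 1, year, rank =>
    (year, (PySem.List.pyGet? pvTermOrder rank).getD "") ::
      (if rank + 1 ≥ 3 then pvLoopA n (year + 1) 0 else pvLoopA n year (rank + 1))

def build_term_sequence_py (enrollment_year : Int) (max_terms : Int) : List (Int × String) :=
  pvLoopA max_terms.toNat enrollment_year pvStartRank

-- ===== PORT B =====
def build_term_sequence_py_alt (enrollment_year : Int) (max_terms : Int) : List (Int × String) :=
  (PySem.List.pyRange 0 max_terms 1).map (fun i =>
    (enrollment_year + PySem.Int.floordiv i 3,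
     (PySem.List.pyGet? pvTermOrder (PySem.Int.mod i 3)).getD ""))

-- ===== PRECONDITION & SPEC =====
def Spec_build_term_sequence_py (enrollment_year : Int) (max_terms : Int) (out : List (Int × String)) : Prop := out = build_term_sequence_py_alt enrollment_year max_terms
instance (enrollment_year : Int) (max_terms : Int) (out : List (Int × String)) : Decidable (Spec_build_term_sequence_py enrollment_year max_terms out) := by unfold Spec_build_term_sequence_py; infer_instance

-- ===== CLAIM (what is proved, stated in full; the proofs are below) =====
def Claim_equal_build_term_sequence_py : Prop := ∀ (enrollment_year : Int) (max_terms : Int), Dom_build_term_sequence_py enrollment_year max_terms → Spec_build_term_sequence_py enrollment_year max_terms (build_term_sequence_py enrollment_year max_terms)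

-- ===== LEMMAS AND PROOFS =====

def pvTerm (r : Int) : String := (PySem.List.pyGet? pvTermOrder r).getD ""

theorem pvLoopA_closed (n : Nat) : ∀ (year rank : Int), (rank = 0 ∨ rank = 1 ∨ rank = 2) →
    pvLoopA n year rank =
      (List.range n).map (fun (k : Nat) =>
        (year + PySem.Int.floordiv (rank + (k : Int)) 3, pvTerm (PySem.Int.mod (rank + (k : Int)) 3))) := by
  induction n with
  | zero => intro year rank _; simp [pvLoopA]
  | succ n ih =>
    intro year rank hr
    rw [List.range_succ_eq_map, List.map_cons, List.map_map]
    rcases hr with h | h | h <;> subst h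
    · rw [pvLoopA, if_neg (by norm_num)]
      refine congrArg₂ List.cons (by simp [pvTerm]) ?_
      rw [show (0:Int)+1 = 1 from by norm_num, ih year 1 (by omega)]
      refine List.map_congr_left (fun k _ => ?_)
      have : (0 : Int) + ((k.succ : Nat) : Int) = 1 + (k : Int) := by push_cast; ring
      simp only [Function.comp, this]
    · rw [pvLoopA, if_neg (by norm_num)]
      refine congrArg₂ List.cons (by simp [pvTerm]) ?_
      rw [show (1:Int)+1 = 2 from by norm_num, ih year 2 (by omega)]
      refine List.map_congr_left (fun k _ => ?_)
      have : (1 : Int) + ((k.succ : Nat) : Int) = 2 + (k : Int) := by push_cast; ring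
      simp only [Function.comp, this]
    · rw [pvLoopA, if_pos (by norm_num)]
      refine congrArg₂ List.cons (by simp [pvTerm]) ?_
      rw [ih (year + 1) 0 (by omega)]
      refine List.map_congr_left (fun k _ => ?_)
      have h1 : (2 : Int) + ((k.succ : Nat) : Int) = ((3 + k : Nat) : Int) := by push_cast; ring
      have h0 : (0 : Int) + ((k : Nat) : Int) = ((k : Nat) : Int) := by ring
      simp only [Function.comp, h1, h0,
        PySem.Int.floordiv_eq_ediv_of_pos (by norm_num : (0:Int) < 3),
        PySem.Int.mod_eq_emod_of_pos (by norm_num : (0:Int) < 3)]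
      refine congrArg₂ Prod.mk (by push_cast; omega) (congrArg pvTerm (by push_cast; omega))

-- ===== VERDICT (by name: the statement is the Claim_ definition above) =====
theorem build_term_sequence_py_spec : Claim_equal_build_term_sequence_py := by
  intro ey mt _
  unfold Spec_build_term_sequence_py build_term_sequence_py build_term_sequence_py_alt pvStartRank
  rw [pvLoopA_closed mt.toNat ey 0 (by omega), PySem.List.pyRange_one, List.map_map]
  have : (mt - 0).toNat = mt.toNat := by omega
  rw [this]
  apply List.map_congr_left
  intro k _
  simp [Function.comp, pvTerm]
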